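-- pv_equiv track=rewrite | github.com/pypi-data/pypi-mirror-397 | packages/splunk-soar-sdk/splunk_soar_sdk-3.6.1-py3-none-any.whl/soar_sdk/webhooks/routing.py | _patterns_conflict
-- ===== SOURCE A (Python) =====
-- def _patterns_conflict(pattern1: str, pattern2: str) -> bool:
--     """Check if two URL patterns conflict with each other.
--
--     Patterns conflict if they have the same structure (same number of segments
--     and the same segments are parameters vs literals), regardless of parameter names.
--
--     Args:
--         pattern1: The first URL pattern
--         pattern2: The second URL pattern
--
--     Returns:
--         True if the patterns conflict, False otherwise
--     """
--     # Split into parts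
--     parts1 = pattern1.removeprefix("/").removesuffix("/").split("/")
--     parts2 = pattern2.removeprefix("/").removesuffix("/").split("/")
--
--     # If different number of segments, no conflict
--     if len(parts1) != len(parts2):
--         return False
--
--     # Check each segment
--     for part1, part2 in zip(parts1, parts2, strict=False):
--         is_param1 = part1.startswith("<") and part1.endswith(">")
--         is_param2 = part2.startswith("<") and part2.endswith(">")
--
--         # If one is a parameter and the other isn't, no conflict
--         if is_param1 != is_param2:
--             return False
--
--         # If both are literals and they're different, no conflict
--         if not is_param1 and not is_param2 and part1 != part2:
--             return False
--
--     # If we got here, the patterns have the same structure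
--     return True
-- ===== SOURCE B (Python) =====
-- def _walk(s1: str, s2: str) -> bool:
--     seg1, sep1, rest1 = s1.partition("/")
--     seg2, sep2, rest2 = s2.partition("/")
--     param1 = seg1.startswith("<") and seg1.endswith(">")
--     param2 = seg2.startswith("<") and seg2.endswith(">")
--     if param1 != param2:
--         return False
--     if not param1 and seg1 != seg2:
--         return False
--     if not (sep1 and sep2):
--         return sep1 == sep2
--     return _walk(rest1, rest2)
--
--
-- def _patterns_conflict(pattern1: str, pattern2: str) -> bool:
--     return _walk(
--         pattern1.removeprefix("/").removesuffix("/"),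
--         pattern2.removeprefix("/").removesuffix("/"),
--     )
-- ===== Notes on version B (the rewrite author's own statement) =====
-- stated objective: alternative
-- what changed: B never builds segment lists: it recursively partitions both raw strings at their first '/' and compares one segment per step, the length mismatch falling out of separator presence, replacing A's split-into-lists, explicit length guard and indexed zip loop.
import Mathlib
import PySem

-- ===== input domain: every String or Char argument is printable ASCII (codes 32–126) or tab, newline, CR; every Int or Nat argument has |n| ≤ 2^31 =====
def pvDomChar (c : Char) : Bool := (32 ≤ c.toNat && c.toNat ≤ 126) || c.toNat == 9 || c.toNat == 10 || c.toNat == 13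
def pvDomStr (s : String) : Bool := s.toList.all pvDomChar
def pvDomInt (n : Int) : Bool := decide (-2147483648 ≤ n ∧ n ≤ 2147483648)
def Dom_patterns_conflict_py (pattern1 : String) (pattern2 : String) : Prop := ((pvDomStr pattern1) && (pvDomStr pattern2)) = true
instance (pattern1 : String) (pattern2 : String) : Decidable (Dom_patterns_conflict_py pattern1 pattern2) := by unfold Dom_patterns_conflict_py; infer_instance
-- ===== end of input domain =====

-- B replaces A's split-into-lists / length-guard / zip-loop by a recursive descent that
-- partitions both raw strings at their first '/' and recurses on the remainders
-- (no segment lists, no length check); objective: alternative decomposition.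


-- s.removeprefix("/").removesuffix("/") — the identical first line of both Pythons
-- (removeprefix/removesuffix of the 1-char "/" are exactly drop 1 / dropLast guarded
--  by startswith/endswith)
def pvStrip (cs : List Char) : List Char :=
  let cs := if PySem.Chars.startswith cs ['/'] then cs.drop 1 else cs
  if PySem.Chars.endswith cs ['/'] then cs.dropLast else cs

-- ===== PORT A =====
-- A's per-pair loop with its early returns (over zip(parts1, parts2))
def pvALoop : List (List Char × List Char) → Bool
  | [] => true
  | (part1, part2) :: rest =>
    let isParam1 := PySem.Chars.startswith part1 ['<'] && PySem.Chars.endswith part1 ['>']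
    let isParam2 := PySem.Chars.startswith part2 ['<'] && PySem.Chars.endswith part2 ['>']
    if isParam1 != isParam2 then false
    else if !isParam1 && !isParam2 && part1 != part2 then false
    else pvALoop rest

def patterns_conflict_py (pattern1 : String) (pattern2 : String) : Bool :=
  let parts1 := PySem.Chars.splitOn (pvStrip pattern1.toList) ['/']
  let parts2 := PySem.Chars.splitOn (pvStrip pattern2.toList) ['/']
  if parts1.length != parts2.length then false
  else pvALoop (parts1.zip parts2)

-- ===== PORT B =====
-- B's _walk: partition each string at its first '/' (Python s.partition("/") =
-- (takeWhile (· ≠ '/'), the separator if present, rest after it)) and recurse.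
def pvWalk (s1 s2 : List Char) : Bool :=
  let seg1 := s1.takeWhile (· ≠ '/')
  let seg2 := s2.takeWhile (· ≠ '/')
  let param1 := PySem.Chars.startswith seg1 ['<'] && PySem.Chars.endswith seg1 ['>']
  let param2 := PySem.Chars.startswith seg2 ['<'] && PySem.Chars.endswith seg2 ['>']
  if param1 != param2 then false
  else if !param1 && seg1 != seg2 then false
  else
    match hrec : s1.dropWhile (· ≠ '/'), s2.dropWhile (· ≠ '/') with
    | _ :: rest1, _ :: rest2 => pvWalk rest1 rest2
    | [], [] => true
    | _, _ => false
termination_by s1.length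
decreasing_by
  have hle : (s1.dropWhile (· ≠ '/')).length ≤ s1.length := s1.length_dropWhile_le _
  rw [hrec] at hle
  simp at hle ⊢
  omega

def patterns_conflict_py_alt (pattern1 : String) (pattern2 : String) : Bool :=
  pvWalk (pvStrip pattern1.toList) (pvStrip pattern2.toList)

-- ===== PRECONDITION & SPEC =====
def Spec_patterns_conflict_py (pattern1 : String) (pattern2 : String) (out : Bool) : Prop := out = patterns_conflict_py_alt pattern1 pattern2
instance (pattern1 : String) (pattern2 : String) (out : Bool) : Decidable (Spec_patterns_conflict_py pattern1 pattern2 out) := by unfold Spec_patterns_conflict_py; infer_instance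

-- ===== CLAIM (what is proved, stated in full; the proofs are below) =====
def Claim_equal_patterns_conflict_py : Prop := ∀ (pattern1 : String) (pattern2 : String), Dom_patterns_conflict_py pattern1 pattern2 → Spec_patterns_conflict_py pattern1 pattern2 (patterns_conflict_py pattern1 pattern2)

-- ===== LEMMAS AND PROOFS =====

-- pure recursive characterisation of s.split("/") (single-char separator)
def pvSplit (l : List Char) : List (List Char) :=
  match h : l.dropWhile (· ≠ '/') with
  | [] => [l.takeWhile (· ≠ '/')]
  | _ :: r => l.takeWhile (· ≠ '/') :: pvSplit r
termination_by l.length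
decreasing_by
  have hle : (l.dropWhile (· ≠ '/')).length ≤ l.length := l.length_dropWhile_le _
  rw [h] at hle
  simp at hle ⊢
  omega

def pvConsHead (x : List Char) : List (List Char) → List (List Char)
  | [] => [x]
  | h :: t => (x ++ h) :: t

theorem pvSplit_sep (rest : List Char) : pvSplit ('/' :: rest) = [] :: pvSplit rest := by
  rw [pvSplit]
  split
  · rename_i heq
    simp at heq
  · rename_i head r heq
    simp at heq
    obtain ⟨h1, h2⟩ := heq
    subst h2
    simp

theorem pvSplit_cons (c : Char) (rest : List Char) (hc : c ≠ '/') :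
    pvSplit (c :: rest) = pvConsHead [c] (pvSplit rest) := by
  rw [pvSplit, pvSplit]
  split <;> split <;>
    first
    | (simp_all [pvConsHead]; done)
    | (exfalso
       have hnil : List.dropWhile (fun x => decide (x ≠ '/')) rest = [] := by
         have h0 : List.dropWhile (fun x => decide (x ≠ '/')) (c :: rest) = [] := by assumption
         simpa [List.dropWhile_cons, hc] using h0
       simp_all)

theorem pvSplit_ne_nil (l : List Char) : pvSplit l ≠ [] := by
  rw [pvSplit]; split <;> simp

theorem pvSplitOn_go (fuel : Nat) (l cur : List Char) (acc : List (List Char))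
    (hf : l.length ≤ fuel) :
    PySem.Chars.splitOn.go ['/'] fuel l cur acc
      = acc.reverse ++ pvConsHead cur.reverse (pvSplit l) := by
  induction fuel generalizing l cur acc with
  | zero =>
    have hl : l = [] := by cases l <;> simp_all
    subst hl
    simp [PySem.Chars.splitOn.go, pvSplit, pvConsHead]
  | succ fuel ih =>
    cases l with
    | nil => simp [PySem.Chars.splitOn.go, pvSplit, pvConsHead]
    | cons c rest =>
      have hrest : rest.length ≤ fuel := by simpa using hf
      by_cases hc : c = '/'
      · subst hc
        rw [show PySem.Chars.splitOn.go ['/'] (fuel+1) ('/' :: rest) cur acc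
              = PySem.Chars.splitOn.go ['/'] fuel rest [] (cur.reverse :: acc) by
            simp [PySem.Chars.splitOn.go, List.isPrefixOf]]
        rw [ih rest [] (cur.reverse :: acc) hrest, pvSplit_sep]
        cases hs : pvSplit rest with
        | nil => exact absurd hs (pvSplit_ne_nil rest)
        | cons h t => simp [pvConsHead]
      · rw [show PySem.Chars.splitOn.go ['/'] (fuel+1) (c :: rest) cur acc
              = PySem.Chars.splitOn.go ['/'] fuel rest (c :: cur) acc by
            simp [PySem.Chars.splitOn.go, List.isPrefixOf]
            intro h
            exact absurd h.symm hc]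
        rw [ih rest (c :: cur) acc hrest, pvSplit_cons c rest hc]
        cases hs : pvSplit rest <;> simp [pvConsHead]

theorem pvSplitOn_eq (l : List Char) :
    PySem.Chars.splitOn l ['/'] = pvSplit l := by
  rw [PySem.Chars.splitOn, pvSplitOn_go (l.length + 1) l [] [] (by omega)]
  cases hs : pvSplit l with
  | nil => exact absurd hs (pvSplit_ne_nil l)
  | cons h t => simp [pvConsHead]

-- the main equivalence: A's length-guard + zip loop over the split lists
-- equals B's recursive descent
theorem pvSplit_eq_single (l : List Char)
    (h : List.dropWhile (fun x => decide (x ≠ '/')) l = []) :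
    pvSplit l = [l.takeWhile (fun x => decide (x ≠ '/'))] := by
  rw [pvSplit]
  split
  · rfl
  · rename_i head r heq
    rw [h] at heq
    cases heq

theorem pvSplit_eq_cons (l : List Char) (c : Char) (r : List Char)
    (h : List.dropWhile (fun x => decide (x ≠ '/')) l = c :: r) :
    pvSplit l = l.takeWhile (fun x => decide (x ≠ '/')) :: pvSplit r := by
  rw [pvSplit]
  split
  · rename_i heq
    rw [h] at heq
    cases heq
  · rename_i head r' heq
    rw [h] at heq
    injection heq with _ hr
    rw [hr]

theorem pvMain (l1 l2 : List Char) :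
    (if (pvSplit l1).length != (pvSplit l2).length then false
     else pvALoop ((pvSplit l1).zip (pvSplit l2))) = pvWalk l1 l2 := by
  rcases h1 : List.dropWhile (fun x => decide (x ≠ '/')) l1 with _ | ⟨c1, r1⟩ <;>
    rcases h2 : List.dropWhile (fun x => decide (x ≠ '/')) l2 with _ | ⟨c2, r2⟩
  · -- both single-segment
    rw [pvSplit_eq_single l1 h1, pvSplit_eq_single l2 h2, pvWalk, h1, h2]
    cases hp1 : (PySem.Chars.startswith (l1.takeWhile (fun x => decide (x ≠ '/'))) ['<'] &&
        PySem.Chars.endswith (l1.takeWhile (fun x => decide (x ≠ '/'))) ['>']) <;>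
      cases hp2 : (PySem.Chars.startswith (l2.takeWhile (fun x => decide (x ≠ '/'))) ['<'] &&
          PySem.Chars.endswith (l2.takeWhile (fun x => decide (x ≠ '/'))) ['>']) <;>
        by_cases hseg : l1.takeWhile (fun x => decide (x ≠ '/'))
            = l2.takeWhile (fun x => decide (x ≠ '/')) <;>
          simp_all [pvALoop]
  · -- l1 single-segment, l2 not: lengths differ, both sides false
    rw [pvSplit_eq_single l1 h1, pvSplit_eq_cons l2 c2 r2 h2, pvWalk, h1, h2]
    cases hpr : pvSplit r2 with
    | nil => exact absurd hpr (pvSplit_ne_nil r2)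
    | cons h t => split <;> simp_all
  · -- l2 single-segment, l1 not: lengths differ, both sides false
    rw [pvSplit_eq_cons l1 c1 r1 h1, pvSplit_eq_single l2 h2, pvWalk, h1, h2]
    cases hpr : pvSplit r1 with
    | nil => exact absurd hpr (pvSplit_ne_nil r1)
    | cons h t => split <;> simp_all
  · -- both have a further segment: recurse
    rw [pvSplit_eq_cons l1 c1 r1 h1, pvSplit_eq_cons l2 c2 r2 h2, pvWalk, h1, h2]
    have IH := pvMain r1 r2
    cases hp1 : (PySem.Chars.startswith (l1.takeWhile (fun x => decide (x ≠ '/'))) ['<'] &&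
        PySem.Chars.endswith (l1.takeWhile (fun x => decide (x ≠ '/'))) ['>']) <;>
      cases hp2 : (PySem.Chars.startswith (l2.takeWhile (fun x => decide (x ≠ '/'))) ['<'] &&
          PySem.Chars.endswith (l2.takeWhile (fun x => decide (x ≠ '/'))) ['>']) <;>
        by_cases hseg : l1.takeWhile (fun x => decide (x ≠ '/'))
            = l2.takeWhile (fun x => decide (x ≠ '/')) <;>
          simp_all [pvALoop]
termination_by l1.length
decreasing_by
  have hle : (List.dropWhile (fun x => decide (x ≠ '/')) l1).length ≤ l1.length :=
    l1.length_dropWhile_le _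
  rw [h1] at hle
  simp at hle
  omega

-- ===== VERDICT (by name: the statement is the Claim_ definition above) =====
theorem patterns_conflict_py_spec : Claim_equal_patterns_conflict_py := by
  intro p1 p2 _
  unfold Spec_patterns_conflict_py patterns_conflict_py patterns_conflict_py_alt
  simp only [pvSplitOn_eq]
  exact pvMain (pvStrip p1.toList) (pvStrip p2.toList)
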